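-- pv_equiv track=rewrite | github.com/g11ma20230417/multi-agent-collaboration | tools/skill_discovery.py | _suggest_next_steps
-- ===== SOURCE A (Python) =====
-- from typing import Dict, List, Any, Optional
--
-- def _suggest_next_steps(analyses: List[Dict]) -> List[str]:
--     """建议下一步"""
--     steps = []
--
--     # 基于分析生成建议
--     has_memory_skill = any(
--         'memory' in a.get('skill_name', '').lower()
--         for a in analyses
--     )
--
--     if has_memory_skill:
--         steps.append('整合语义记忆模式到知识库')
--         steps.append('增强Learner Agent的上下文管理')
--
--     has_automation = any(
--         'aggregator' in a.get('skill_name', '').lower()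
--         for a in analyses
--     )
--
--     if has_automation:
--         steps.append('借鉴工作流编排模式')
--         steps.append('增强OrchestrationEngine')
--
--     return steps
-- ===== SOURCE B (Python) =====
-- def _suggest_next_steps(analyses):
--     """建议下一步"""
--     has_memory = False
--     has_automation = False
--     for a in analyses:
--         name = a.get('skill_name', '').lower()
--         if 'memory' in name:
--             has_memory = True
--         if 'aggregator' in name:
--             has_automation = True
--         if has_memory and has_automation:
--             break
--     steps = []
--     if has_memory:
--         steps.append('整合语义记忆模式到知识库')
--         steps.append('增强Learner Agent的上下文管理')
--     if has_automation:
--         steps.append('借鉴工作流编排模式')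
--         steps.append('增强OrchestrationEngine')
--     return steps
-- ===== Notes on version B (the rewrite author's own statement) =====
-- stated objective: alternative
-- what changed: Replaces the two independent any(...) scans over analyses with one combined pass maintaining two boolean flags and an early break once both are set.
import Mathlib
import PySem

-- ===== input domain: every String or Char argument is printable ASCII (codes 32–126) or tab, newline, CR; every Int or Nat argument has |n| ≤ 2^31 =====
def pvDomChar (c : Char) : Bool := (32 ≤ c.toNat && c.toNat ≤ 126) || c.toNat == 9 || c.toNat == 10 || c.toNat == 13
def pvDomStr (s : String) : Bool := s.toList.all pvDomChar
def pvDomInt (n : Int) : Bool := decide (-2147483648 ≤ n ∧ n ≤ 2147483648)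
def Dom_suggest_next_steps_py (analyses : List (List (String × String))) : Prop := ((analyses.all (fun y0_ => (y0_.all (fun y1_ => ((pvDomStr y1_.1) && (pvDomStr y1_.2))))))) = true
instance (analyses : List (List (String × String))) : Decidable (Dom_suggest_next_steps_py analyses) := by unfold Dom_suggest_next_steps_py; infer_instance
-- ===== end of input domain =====

-- B replaces A's two independent any(...) scans with a single pass keeping two flags (early break); same output.


-- ===== PORT A =====
-- a.get('skill_name', '').lower()
def pvSkillName (a : List (String × String)) : String :=
  PySem.Str.lower (PySem.Dict.getD (PySem.Dict.mk a) "skill_name" "")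

def suggest_next_steps_py (analyses : List (List (String × String))) : List String :=
  let steps : List String := []
  let has_memory_skill := analyses.any (fun a => PySem.Str.isIn "memory" (pvSkillName a))
  let steps := if has_memory_skill then steps ++ ["整合语义记忆模式到知识库"] ++ ["增强Learner Agent的上下文管理"] else steps
  let has_automation := analyses.any (fun a => PySem.Str.isIn "aggregator" (pvSkillName a))
  let steps := if has_automation then steps ++ ["借鉴工作流编排模式"] ++ ["增强OrchestrationEngine"] else steps
  steps

-- ===== PORT B =====
-- single pass: carry (has_memory, has_automation), break once both are set
def pvScanFlags : List (List (String × String)) → Bool → Bool → Bool × Bool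
  | [], hm, ha => (hm, ha)
  | a :: rest, hm, ha =>
    let name := pvSkillName a
    let hm := hm || PySem.Str.isIn "memory" name
    let ha := ha || PySem.Str.isIn "aggregator" name
    if hm && ha then (hm, ha) else pvScanFlags rest hm ha

def suggest_next_steps_py_alt (analyses : List (List (String × String))) : List String :=
  let flags := pvScanFlags analyses false false
  (if flags.1 then ["整合语义记忆模式到知识库", "增强Learner Agent的上下文管理"] else []) ++
  (if flags.2 then ["借鉴工作流编排模式", "增强OrchestrationEngine"] else [])

-- ===== PRECONDITION & SPEC =====
def Spec_suggest_next_steps_py (analyses : List (List (String × String))) (out : List String) : Prop := out = suggest_next_steps_py_alt analyses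
instance (analyses : List (List (String × String))) (out : List String) : Decidable (Spec_suggest_next_steps_py analyses out) := by unfold Spec_suggest_next_steps_py; infer_instance

-- ===== CLAIM (what is proved, stated in full; the proofs are below) =====
def Claim_equal_suggest_next_steps_py : Prop := ∀ (analyses : List (List (String × String))), Dom_suggest_next_steps_py analyses → Spec_suggest_next_steps_py analyses (suggest_next_steps_py analyses)

-- ===== LEMMAS AND PROOFS =====
theorem pvScanFlags_eq (l : List (List (String × String))) (hm ha : Bool) :
    pvScanFlags l hm ha =
      (hm || l.any (fun a => PySem.Str.isIn "memory" (pvSkillName a)),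
       ha || l.any (fun a => PySem.Str.isIn "aggregator" (pvSkillName a))) := by
  induction l generalizing hm ha with
  | nil => simp [pvScanFlags]
  | cons a rest ih =>
    simp only [pvScanFlags, List.any_cons]
    split
    · rename_i h
      have h1 := (Bool.and_eq_true _ _).mp h
      simp [h1.1]
      constructor
      · cases hm <;> simp_all
      · cases ha <;> simp_all
    · rw [ih]
      simp [Bool.or_assoc]

-- ===== VERDICT (by name: the statement is the Claim_ definition above) =====
theorem suggest_next_steps_py_spec : Claim_equal_suggest_next_steps_py := by
  intro analyses _
  unfold Spec_suggest_next_steps_py suggest_next_steps_py suggest_next_steps_py_alt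
  rw [pvScanFlags_eq]
  simp only [Bool.false_or]
  cases analyses.any (fun a => PySem.Str.isIn "memory" (pvSkillName a)) <;>
  cases analyses.any (fun a => PySem.Str.isIn "aggregator" (pvSkillName a)) <;> simp
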